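-- pv_equiv track=rewrite | github.com/popojan/orbit | scripts/regulator_boundary_theory.py | is_simple_pattern
-- ===== SOURCE A (Python) =====
-- def is_simple_pattern(trace):
--     """Check if trace has simple [i, 2i, i] pattern"""
--     branches = [step[1] for step in trace]
--     plus = branches.count('+')
--     minus = branches.count('-')
--
--     if plus != minus:
--         return None  # Not symmetric
--
--     # Extract run lengths
--     runs = []
--     if len(branches) == 0:
--         return None
--
--     current_char = branches[0]
--     current_len = 1
--     for b in branches[1:]:
--         if b == current_char:
--             current_len += 1
--         else:
--             runs.append(current_len)
--             current_char = b
--             current_len = 1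
--     runs.append(current_len)
--
--     # Check for simple pattern
--     i = len(branches) // 4
--     is_simple = (len(runs) == 3 and runs == [i, 2*i, i])
--
--     return is_simple
-- ===== SOURCE B (Python) =====
-- def is_simple_pattern(trace):
--     """Check if trace has simple [i, 2i, i] pattern"""
--     branches = [step[1] for step in trace]
--     if branches.count('+') != branches.count('-'):
--         return None  # Not symmetric
--     if len(branches) == 0:
--         return None
--     n = len(branches)
--     i = n // 4
--     if i < 1 or n != 4 * i:
--         return False
--     b1 = branches[:i]
--     b2 = branches[i:3 * i]
--     b3 = branches[3 * i:]
--     return (all(x == b1[0] for x in b1)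
--             and all(x == b2[0] for x in b2) and b2[0] != b1[0]
--             and all(x == b3[0] for x in b3) and b3[0] != b2[0])
-- ===== Notes on version B (the rewrite author's own statement) =====
-- stated objective: simpler
-- what changed: B drops A's run-length-encoding loop entirely and instead verifies the [i,2i,i] pattern in place: it computes i = len//4, requires i >= 1 and len == 4*i, and checks the three slices branches[:i], branches[i:3i], branches[3i:] for uniformity and distinct neighbouring characters.
import Mathlib
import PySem

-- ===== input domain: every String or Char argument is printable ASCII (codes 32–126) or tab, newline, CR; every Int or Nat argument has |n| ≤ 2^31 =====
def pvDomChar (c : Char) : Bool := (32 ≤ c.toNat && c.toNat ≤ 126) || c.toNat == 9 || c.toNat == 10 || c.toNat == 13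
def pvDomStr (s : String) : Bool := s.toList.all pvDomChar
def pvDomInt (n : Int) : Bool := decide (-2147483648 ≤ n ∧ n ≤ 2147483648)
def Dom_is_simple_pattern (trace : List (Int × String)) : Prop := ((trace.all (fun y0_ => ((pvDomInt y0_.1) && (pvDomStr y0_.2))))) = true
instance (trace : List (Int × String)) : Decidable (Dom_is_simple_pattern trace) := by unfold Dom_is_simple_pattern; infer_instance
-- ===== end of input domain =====

-- B replaces A's run-length-encoding loop by direct slice checks of the three
-- blocks [i, 2i, i] (objective: simpler — no run-length list is built).

-- ===== PORT A =====
-- A's run-extraction for-loop, as structural recursion over the same state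
-- (runs accumulator, current char, current run length).
def pvRunLoop (bs : List String) (cur : String) (len : Int) (runs : List Int) : List Int :=
  match bs with
  | [] => runs ++ [len]
  | b :: rest =>
    if b == cur then pvRunLoop rest cur (len + 1) runs
    else pvRunLoop rest b 1 (runs ++ [len])

def is_simple_pattern (trace : List (Int × String)) : Option Bool :=
  let branches := trace.map (fun step => step.2)
  let plus := branches.count "+"
  let minus := branches.count "-"
  if plus ≠ minus then none
  else
    match branches with
    | [] => none
    | c :: rest =>
      let runs := pvRunLoop rest c 1 []
      let i : Int := PySem.Int.floordiv ((c :: rest).length : Int) 4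
      some (decide (runs.length = 3 ∧ runs = [i, 2 * i, i]))

-- ===== PORT B =====
-- Source B's slices branches[:i], branches[i:3*i], branches[3*i:] have non-negative
-- in-range bounds, so they are exactly take/drop.
def is_simple_pattern_alt (trace : List (Int × String)) : Option Bool :=
  let branches := trace.map (fun step => step.2)
  if branches.count "+" ≠ branches.count "-" then none
  else if branches.length = 0 then none
  else
    let n := branches.length
    let i := n / 4
    if i < 1 ∨ n ≠ 4 * i then some false
    else
      let b1 := branches.take i
      let b2 := (branches.drop i).take (2 * i)
      let b3 := branches.drop (3 * i)
      some (b1.all (fun x => x == b1.headD "") &&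
            (b2.all (fun x => x == b2.headD "") && (b2.headD "" != b1.headD "") &&
             (b3.all (fun x => x == b3.headD "") && (b3.headD "" != b2.headD ""))))

-- ===== PRECONDITION & SPEC =====
def Spec_is_simple_pattern (trace : List (Int × String)) (out : Option Bool) : Prop := out = is_simple_pattern_alt trace
instance (trace : List (Int × String)) (out : Option Bool) : Decidable (Spec_is_simple_pattern trace out) := by unfold Spec_is_simple_pattern; infer_instance

-- ===== CLAIM (what is proved, stated in full; the proofs are below) =====
def Claim_equal_is_simple_pattern : Prop := ∀ (trace : List (Int × String)), Dom_is_simple_pattern trace → Spec_is_simple_pattern trace (is_simple_pattern trace)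

-- ===== LEMMAS AND PROOFS =====

-- Run-length encoding built from the front: pvConsRun merges a run of k copies
-- of c onto an encoding, pvRunsOf encodes a whole list.
def pvConsRun (c : String) (k : Nat) : List (String × Nat) → List (String × Nat)
  | [] => [(c, k)]
  | (y, m) :: t => if c = y then (c, k + m) :: t else (c, k) :: (y, m) :: t

def pvRunsOf : List String → List (String × Nat)
  | [] => []
  | x :: xs => pvConsRun x 1 (pvRunsOf xs)

theorem pvConsRun_head (c : String) (k : Nat) (rs : List (String × Nat)) :
    ∃ m t, pvConsRun c k rs = (c, m) :: t := by
  cases rs with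
  | nil => exact ⟨k, [], rfl⟩
  | cons p t =>
    obtain ⟨y, m⟩ := p
    by_cases h : c = y <;> simp [pvConsRun, h]

theorem pvConsRun_merge (c : String) (k : Nat) (rs : List (String × Nat)) :
    pvConsRun c k (pvConsRun c 1 rs) = pvConsRun c (k + 1) rs := by
  cases rs with
  | nil => simp [pvConsRun]
  | cons p t =>
    obtain ⟨y, m⟩ := p
    by_cases h : c = y <;> simp [pvConsRun, h] <;> omega

theorem pvConsRun_merge' (c : String) (k : Nat) (rs : List (String × Nat)) :
    pvConsRun c 1 (pvConsRun c k rs) = pvConsRun c (k + 1) rs := by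
  cases rs with
  | nil => simp [pvConsRun, Nat.add_comm]
  | cons p t =>
    obtain ⟨y, m⟩ := p
    by_cases h : c = y <;> simp [pvConsRun, h] <;> omega

theorem pvRunLoop_eq (bs : List String) (cur : String) (k : Nat) (acc : List Int) :
    pvRunLoop bs cur (k : Int) acc
      = acc ++ (pvConsRun cur k (pvRunsOf bs)).map (fun p => ((p.2 : Nat) : Int)) := by
  induction bs generalizing cur k acc with
  | nil => simp [pvRunLoop, pvRunsOf, pvConsRun]
  | cons b rest ih =>
    by_cases h : b = cur
    · subst h
      have h1 : ((k : Int) + 1) = ((k + 1 : Nat) : Int) := by push_cast; ring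
      rw [show pvRunLoop (b :: rest) b (k : Int) acc = pvRunLoop rest b ((k : Int) + 1) acc by
            simp [pvRunLoop], h1, ih]
      simp [pvRunsOf, pvConsRun_merge]
    · rw [show pvRunLoop (b :: rest) cur (k : Int) acc = pvRunLoop rest b 1 (acc ++ [(k : Int)]) by
            simp [pvRunLoop, h],
          show (1 : Int) = ((1 : Nat) : Int) by norm_num, ih]
      obtain ⟨m, t, hm⟩ := pvConsRun_head b 1 (pvRunsOf rest)
      have h' : cur ≠ b := Ne.symm h
      simp only [pvRunsOf]
      rw [hm]
      simp [pvConsRun, h']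

theorem pvConsRun_sum (c : String) (k : Nat) (rs : List (String × Nat)) :
    ((pvConsRun c k rs).map Prod.snd).sum = k + (rs.map Prod.snd).sum := by
  cases rs with
  | nil => simp [pvConsRun]
  | cons p t =>
    obtain ⟨y, m⟩ := p
    by_cases h : c = y <;> simp [pvConsRun, h] <;> omega

theorem pvRunsOf_sum (bs : List String) :
    ((pvRunsOf bs).map Prod.snd).sum = bs.length := by
  induction bs with
  | nil => simp [pvRunsOf]
  | cons b rest ih => simp [pvRunsOf, pvConsRun_sum, ih]; omega

theorem pvConsRun_flat (c : String) (k : Nat) (rs : List (String × Nat)) :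
    (pvConsRun c k rs).flatMap (fun p => List.replicate p.2 p.1)
      = List.replicate k c ++ rs.flatMap (fun p => List.replicate p.2 p.1) := by
  cases rs with
  | nil => simp [pvConsRun]
  | cons p t =>
    obtain ⟨y, m⟩ := p
    by_cases h : c = y
    · subst h
      rw [show pvConsRun c k ((c, m) :: t) = (c, k + m) :: t by simp [pvConsRun]]
      simp only [List.flatMap_cons]
      rw [List.replicate_add, List.append_assoc]
    · simp [pvConsRun, h]

theorem pvRunsOf_flat (bs : List String) :
    (pvRunsOf bs).flatMap (fun p => List.replicate p.2 p.1) = bs := by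
  induction bs with
  | nil => simp [pvRunsOf]
  | cons b rest ih => simp [pvRunsOf, pvConsRun_flat, ih]

theorem pvConsRun_chain (c : String) (k : Nat) (rs : List (String × Nat))
    (h : rs.IsChain (fun p q => p.1 ≠ q.1)) :
    (pvConsRun c k rs).IsChain (fun p q => p.1 ≠ q.1) := by
  cases rs with
  | nil => simp [pvConsRun]
  | cons p t =>
    obtain ⟨y, m⟩ := p
    by_cases hc : c = y
    · subst hc
      cases t with
      | nil => simp [pvConsRun]
      | cons q u =>
        rw [show pvConsRun c k ((c, m) :: q :: u) = (c, k + m) :: q :: u by simp [pvConsRun]]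
        rw [List.isChain_cons_cons] at h ⊢
        exact h
    · simp only [pvConsRun, if_neg hc]
      rw [List.isChain_cons_cons]
      exact ⟨hc, h⟩

theorem pvRunsOf_chain (bs : List String) :
    (pvRunsOf bs).IsChain (fun p q => p.1 ≠ q.1) := by
  induction bs with
  | nil => simp [pvRunsOf]
  | cons b rest ih => exact pvConsRun_chain b 1 _ ih

theorem pvConsRun_pos (c : String) (k : Nat) (rs : List (String × Nat))
    (hk : 1 ≤ k) (h : ∀ p ∈ rs, 1 ≤ p.2) :
    ∀ p ∈ pvConsRun c k rs, 1 ≤ p.2 := by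
  cases rs with
  | nil => simpa [pvConsRun] using hk
  | cons p t =>
    obtain ⟨y, m⟩ := p
    by_cases hc : c = y
    · subst hc
      intro q hq
      rw [show pvConsRun c k ((c, m) :: t) = (c, k + m) :: t by simp [pvConsRun]] at hq
      rcases List.mem_cons.mp hq with hq | hq
      · simp [hq]; omega
      · exact h q (List.mem_cons_of_mem _ hq)
    · intro q hq
      rw [show pvConsRun c k ((y, m) :: t) = (c, k) :: (y, m) :: t by simp [pvConsRun, hc]] at hq
      rcases List.mem_cons.mp hq with hq | hq
      · simp [hq]; omega
      · exact h q hq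

theorem pvRunsOf_pos (bs : List String) :
    ∀ p ∈ pvRunsOf bs, 1 ≤ p.2 := by
  induction bs with
  | nil => simp [pvRunsOf]
  | cons b rest ih => exact pvConsRun_pos b 1 _ le_rfl ih

theorem pvRunsOf_replicate_append (x : String) (k : Nat) (hk : 1 ≤ k) (r : List String) :
    pvRunsOf (List.replicate k x ++ r) = pvConsRun x k (pvRunsOf r) := by
  induction k with
  | zero => omega
  | succ k ih =>
    rcases Nat.eq_zero_or_pos k with h0 | hpos
    · subst h0; simp [pvRunsOf]
    · rw [List.replicate_succ, List.cons_append]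
      show pvConsRun x 1 (pvRunsOf (List.replicate k x ++ r)) = _
      rw [ih hpos, pvConsRun_merge']

theorem pvHeadD_replicate (x d : String) (k : Nat) (hk : 1 ≤ k) :
    (List.replicate k x).headD d = x := by
  cases k with
  | zero => omega
  | succ k => simp [List.replicate_succ]

theorem pvAll_headD (l : List String) (d : String)
    (h : l.all (fun x => x == l.headD d) = true) :
    l = List.replicate l.length (l.headD d) := by
  cases l with
  | nil => rfl
  | cons a t =>
    simp only [List.headD_cons, List.all_eq_true, beq_iff_eq] at h
    rw [List.eq_replicate_iff]
    exact ⟨rfl, fun b hb => h b hb⟩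

-- The central characterisation: the run lengths of bs are [i, 2i, i] exactly
-- when bs consists of three uniform blocks of sizes i, 2i, i with distinct
-- neighbouring characters.
theorem pvRuns_eq_iff (bs : List String) (i : Nat) :
    (pvRunsOf bs).map Prod.snd = [i, 2 * i, i] ↔
      (1 ≤ i ∧ bs.length = 4 * i ∧
        ∃ x y z, bs = List.replicate i x ++ (List.replicate (2 * i) y ++ List.replicate i z)
          ∧ x ≠ y ∧ y ≠ z) := by
  constructor
  · intro h
    rcases hrs : pvRunsOf bs with _ | ⟨⟨x, a⟩, _ | ⟨⟨y, b⟩, _ | ⟨⟨z, cc⟩, _ | ⟨p4, t4⟩⟩⟩⟩ <;>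
      rw [hrs] at h <;> simp at h
    obtain ⟨ha, hb, hc⟩ := h
    have hpos := pvRunsOf_pos bs
    rw [hrs] at hpos
    have hpa : 1 ≤ a := by simpa using hpos (x, a) (by simp)
    have hi : 1 ≤ i := by omega
    have hsum := pvRunsOf_sum bs
    rw [hrs] at hsum
    simp at hsum
    have hflat := pvRunsOf_flat bs
    rw [hrs] at hflat
    have hchain := pvRunsOf_chain bs
    rw [hrs] at hchain
    rw [List.isChain_cons_cons, List.isChain_cons_cons] at hchain
    refine ⟨hi, by omega, x, y, z, ?_, hchain.1, hchain.2.1⟩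
    have hstruct : bs = List.replicate a x ++ (List.replicate b y ++ List.replicate cc z) := by
      rw [← hflat]; simp [List.flatMap_cons]
    rw [hstruct]
    have ea : a = i := by omega
    have eb : b = 2 * i := by omega
    have ec : cc = i := by omega
    rw [ea, eb, ec]
  · rintro ⟨hi, hn, x, y, z, hbs, hxy, hyz⟩
    subst hbs
    rw [pvRunsOf_replicate_append x i hi,
        pvRunsOf_replicate_append y (2 * i) (by omega),
        show pvRunsOf (List.replicate i z) = pvConsRun z i (pvRunsOf []) by
          simpa using pvRunsOf_replicate_append z i hi []]
    simp [pvRunsOf, pvConsRun, hxy, hyz]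

-- B's slice checks hold exactly for the same three-block structure.
theorem pvConj_iff (bs : List String) (i : Nat) (hi : 1 ≤ i) (hn : bs.length = 4 * i) :
    ((bs.take i).all (fun x => x == (bs.take i).headD "") &&
     (((bs.drop i).take (2 * i)).all (fun x => x == ((bs.drop i).take (2 * i)).headD "") &&
        (((bs.drop i).take (2 * i)).headD "" != (bs.take i).headD "") &&
      ((bs.drop (3 * i)).all (fun x => x == (bs.drop (3 * i)).headD "") &&
        ((bs.drop (3 * i)).headD "" != ((bs.drop i).take (2 * i)).headD "")))) = true ↔
      (∃ x y z, bs = List.replicate i x ++ (List.replicate (2 * i) y ++ List.replicate i z)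
        ∧ x ≠ y ∧ y ≠ z) := by
  constructor
  · intro h
    simp only [Bool.and_eq_true, bne_iff_ne] at h
    obtain ⟨h1, ⟨h2, h21⟩, h3, h31⟩ := h
    refine ⟨(bs.take i).headD "", ((bs.drop i).take (2 * i)).headD "",
            (bs.drop (3 * i)).headD "", ?_, Ne.symm h21, Ne.symm h31⟩
    have e1 := pvAll_headD _ _ h1
    have e2 := pvAll_headD _ _ h2
    have e3 := pvAll_headD _ _ h3
    have l1 : (bs.take i).length = i := by simp; omega
    have l2 : ((bs.drop i).take (2 * i)).length = 2 * i := by simp; omega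
    have l3 : (bs.drop (3 * i)).length = i := by simp; omega
    rw [l1] at e1; rw [l2] at e2; rw [l3] at e3
    calc bs = bs.take i ++ ((bs.drop i).take (2 * i) ++ (bs.drop i).drop (2 * i)) := by
            simp
      _ = bs.take i ++ ((bs.drop i).take (2 * i) ++ bs.drop (3 * i)) := by
            rw [List.drop_drop]; ring_nf
      _ = _ := by rw [← e1, ← e2, ← e3]
  · rintro ⟨x, y, z, hbs, hxy, hyz⟩
    have hx : bs.take i = List.replicate i x := by
      rw [hbs, List.take_append_of_le_length (by simp)]
      simp
    have hdrop : bs.drop i = List.replicate (2 * i) y ++ List.replicate i z := by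
      rw [hbs]
      rw [List.drop_append_of_le_length (by simp)]
      simp
    have hy : (bs.drop i).take (2 * i) = List.replicate (2 * i) y := by
      rw [hdrop, List.take_append_of_le_length (by simp)]
      simp
    have hz : bs.drop (3 * i) = List.replicate i z := by
      have : bs.drop (3 * i) = (bs.drop i).drop (2 * i) := by
        rw [List.drop_drop]; ring_nf
      rw [this, hdrop, List.drop_append_of_le_length (by simp)]
      simp
    rw [hx, hy, hz]
    simp only [Bool.and_eq_true, bne_iff_ne, List.all_eq_true, beq_iff_eq]
    rw [pvHeadD_replicate x "" i hi, pvHeadD_replicate y "" (2 * i) (by omega),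
        pvHeadD_replicate z "" i hi]
    refine ⟨?_, ⟨⟨?_, hxy.symm⟩, ?_, hyz.symm⟩⟩ <;> intro b hb <;>
      exact (List.eq_of_mem_replicate hb)

-- The two ports agree for any branch list.
theorem pvPort_eq (bs : List String) :
    (if bs.count "+" ≠ bs.count "-" then (none : Option Bool)
     else
       match bs with
       | [] => none
       | c :: rest =>
         some (decide ((pvRunLoop rest c 1 []).length = 3 ∧
           pvRunLoop rest c 1 [] =
             [PySem.Int.floordiv ((c :: rest).length : Int) 4,
              2 * PySem.Int.floordiv ((c :: rest).length : Int) 4,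
              PySem.Int.floordiv ((c :: rest).length : Int) 4])))
    =
    (if bs.count "+" ≠ bs.count "-" then none
     else if bs.length = 0 then none
     else if bs.length / 4 < 1 ∨ bs.length ≠ 4 * (bs.length / 4) then some false
     else
       some ((bs.take (bs.length / 4)).all (fun x => x == (bs.take (bs.length / 4)).headD "") &&
         (((bs.drop (bs.length / 4)).take (2 * (bs.length / 4))).all
              (fun x => x == ((bs.drop (bs.length / 4)).take (2 * (bs.length / 4))).headD "") &&
            (((bs.drop (bs.length / 4)).take (2 * (bs.length / 4))).headD "" !=
              (bs.take (bs.length / 4)).headD "") &&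
          ((bs.drop (3 * (bs.length / 4))).all
              (fun x => x == (bs.drop (3 * (bs.length / 4))).headD "") &&
            ((bs.drop (3 * (bs.length / 4))).headD "" !=
              ((bs.drop (bs.length / 4)).take (2 * (bs.length / 4))).headD ""))))) := by
  by_cases hpm : bs.count "+" ≠ bs.count "-"
  · simp [hpm]
  · rw [if_neg hpm, if_neg hpm]
    cases bs with
    | nil => simp
    | cons c rest =>
      rw [if_neg (by simp)]
      set bs := c :: rest with hbs
      set n := bs.length with hnn
      set i := n / 4 with hi
      have hI : PySem.Int.floordiv (n : Int) 4 = ((i : Nat) : Int) := by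
        exact_mod_cast PySem.Int.floordiv_natCast n 4
      have hruns : pvRunLoop rest c 1 [] = (pvRunsOf bs).map (fun p => ((p.2 : Nat) : Int)) := by
        have := pvRunLoop_eq rest c 1 []
        simpa [pvRunsOf] using this
      have cast3 : ∀ (L : List Nat) (a b c : Nat),
          L.map (fun m : Nat => (m : Int)) = [(a : Int), (b : Int), (c : Int)] ↔ L = [a, b, c] := by
        intro L a b c
        match L with
        | [] => simp
        | [_] => simp
        | [_, _] => simp
        | [_, _, _] => simp
        | _ :: _ :: _ :: _ :: _ => simp
      have hmm : (pvRunsOf bs).map (fun p => ((p.2 : Nat) : Int))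
          = ((pvRunsOf bs).map Prod.snd).map (fun m : Nat => (m : Int)) := by
        rw [List.map_map]; rfl
      have h2i : (2 : Int) * ((i : Nat) : Int) = ((2 * i : Nat) : Int) := by push_cast; ring
      have hAiff : ((pvRunLoop rest c 1 []).length = 3 ∧
          pvRunLoop rest c 1 [] =
            [PySem.Int.floordiv (n : Int) 4, 2 * PySem.Int.floordiv (n : Int) 4,
             PySem.Int.floordiv (n : Int) 4]) ↔
          (pvRunsOf bs).map Prod.snd = [i, 2 * i, i] := by
        rw [hI, hruns, hmm, h2i, cast3]
        constructor
        · rintro ⟨-, h⟩; exact h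
        · intro h; exact ⟨by simp [h], h⟩
      by_cases hgate : i < 1 ∨ n ≠ 4 * i
      · rw [if_pos hgate]
        refine congrArg some ?_
        rw [decide_eq_false_iff_not]
        intro hA
        obtain ⟨h1, h4, -⟩ := (pvRuns_eq_iff bs i).mp (hAiff.mp hA)
        omega
      · rw [if_neg hgate]
        have h1 : 1 ≤ i := by omega
        have h4 : bs.length = 4 * i := by omega
        refine congrArg some ?_
        rw [Bool.eq_iff_iff, decide_eq_true_eq, hAiff, pvRuns_eq_iff,
            pvConj_iff bs i h1 h4]
        constructor
        · rintro ⟨-, -, h⟩; exact h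
        · intro h; exact ⟨h1, by omega, h⟩

-- ===== VERDICT (by name: the statement is the Claim_ definition above) =====
theorem is_simple_pattern_spec : Claim_equal_is_simple_pattern := by
  intro trace _
  show is_simple_pattern trace = is_simple_pattern_alt trace
  exact pvPort_eq (trace.map (fun step => step.2))
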